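-- pv_equiv track=rewrite | github.com/WiktorDybalski/Python_projects_term1 | Set 2/20.py | common_digit
-- ===== SOURCE A (Python) =====
-- def common_digit(x, y, s):
--     D = [False] * s
--     while x > 0:
--         D[x % s] = True
--         x //= s
--     while y > 0:
--         if D[y % s]:
--             return True
--         y //= s
--     return False
-- ===== SOURCE B (Python) =====
-- def common_digit(x, y, s):
--     while x > 0:
--         d = x % s
--         yy = y
--         while yy > 0:
--             if yy % s == d:
--                 return True
--             yy //= s
--         x //= s
--     return False
-- ===== Notes on version B (the rewrite author's own statement) =====
-- stated objective: alternative
-- what changed: B uses no membership structure at all: instead of recording x's digits in a length-s boolean array and scanning y's digits against it, B compares every digit of x against every digit of y with a brute-force nested loop, trading A's O(s) table for an O(dx*dy) pairwise scan.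
import Mathlib
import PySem

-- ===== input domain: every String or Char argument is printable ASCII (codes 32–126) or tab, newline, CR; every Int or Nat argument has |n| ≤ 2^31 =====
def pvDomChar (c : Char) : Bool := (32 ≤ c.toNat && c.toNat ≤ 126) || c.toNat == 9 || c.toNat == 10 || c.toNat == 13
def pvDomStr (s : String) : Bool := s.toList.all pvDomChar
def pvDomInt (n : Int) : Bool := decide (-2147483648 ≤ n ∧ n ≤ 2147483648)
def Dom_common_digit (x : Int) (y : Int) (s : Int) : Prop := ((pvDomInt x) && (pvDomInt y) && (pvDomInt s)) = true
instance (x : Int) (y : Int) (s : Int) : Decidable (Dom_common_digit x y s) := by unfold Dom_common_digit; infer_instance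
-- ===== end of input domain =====

-- B drops A's length-s boolean table and record-then-test scan for a brute-force nested
-- loop comparing every digit of x to every digit of y (objective: alternative).

-- termination helper for the while-loops: n //= s shrinks n.toNat when 0 < n and 1 < s
theorem pv_floordiv_toNat_lt {n s : Int} (hn : 0 < n) (hs : 1 < s) :
    (PySem.Int.floordiv n s).toNat < n.toNat := by
  rw [PySem.Int.floordiv_eq_ediv_of_pos (by omega)]
  have h1 : n / s < n := Int.ediv_lt_of_lt_mul (by omega) (by nlinarith)
  have h2 : 0 ≤ n / s := Int.ediv_nonneg (le_of_lt hn) (by omega)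
  omega

-- termination helper for B's loops when s < 0: one division step makes n nonpositive
theorem pv_floordiv_neg_toNat_lt {n s : Int} (hn : 0 < n) (hs : s < 0) :
    (PySem.Int.floordiv n s).toNat < n.toNat := by
  have hqr := PySem.Int.floordiv_mul_add_mod n s
  have hb := PySem.Int.mod_neg_bounds (a := n) hs
  have hq : PySem.Int.floordiv n s < 0 := by nlinarith
  omega

-- ===== PORT A =====
-- while x > 0: D[x % s] = True; x //= s   (guard also requires 1 < s: for s ≤ 1 with
-- x > 0 the Python raises or diverges, which Pre_ excludes)
def cdLoop1 (x s : Int) (D : List Bool) : List Bool :=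
  if h : 0 < x ∧ 1 < s then
    cdLoop1 (PySem.Int.floordiv x s) s (PySem.List.pySetD D (PySem.Int.mod x s) true)
  else D
termination_by x.toNat
decreasing_by exact pv_floordiv_toNat_lt h.1 h.2

-- while y > 0: if D[y % s]: return True; y //= s; return False
def cdLoop2 (y s : Int) (D : List Bool) : Bool :=
  if h : 0 < y ∧ 1 < s then
    if PySem.List.pyGetD D (PySem.Int.mod y s) false then true
    else cdLoop2 (PySem.Int.floordiv y s) s D
  else false
termination_by y.toNat
decreasing_by exact pv_floordiv_toNat_lt h.1 h.2

def common_digit (x : Int) (y : Int) (s : Int) : Bool :=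
  cdLoop2 y s (cdLoop1 x s (List.replicate s.toNat false))

-- ===== PORT B =====
-- inner: while yy > 0: if yy % s == d: return True; yy //= s; return False
-- (guard also requires s ≠ 0, s ≠ 1: for s = 0 the Python raises, for s = 1 it
-- diverges; both cases lie outside Pre_)
def altInner (yy s d : Int) : Bool :=
  if h : 0 < yy ∧ (1 < s ∨ s < 0) then
    if PySem.Int.mod yy s == d then true
    else altInner (PySem.Int.floordiv yy s) s d
  else false
termination_by yy.toNat
decreasing_by
  rcases h.2 with hs | hs
  · exact pv_floordiv_toNat_lt h.1 hs
  · exact pv_floordiv_neg_toNat_lt h.1 hs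

-- outer: while x > 0: d = x % s; <inner loop over y>; x //= s; return False
def altOuter (x y s : Int) : Bool :=
  if h : 0 < x ∧ (1 < s ∨ s < 0) then
    if altInner y s (PySem.Int.mod x s) then true
    else altOuter (PySem.Int.floordiv x s) y s
  else false
termination_by x.toNat
decreasing_by
  rcases h.2 with hs | hs
  · exact pv_floordiv_toNat_lt h.1 hs
  · exact pv_floordiv_neg_toNat_lt h.1 hs

def common_digit_alt (x : Int) (y : Int) (s : Int) : Bool := altOuter x y s

-- ===== PRECONDITION & SPEC =====
-- Pre_ excludes exactly the inputs where A does not return normally: for s ≤ 1 with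
-- x > 0 or y > 0, A raises (ZeroDivisionError / IndexError) or loops forever (s = 1).
def Pre_common_digit (x : Int) (y : Int) (s : Int) : Prop := 2 ≤ s ∨ (x ≤ 0 ∧ y ≤ 0)
instance (x : Int) (y : Int) (s : Int) : Decidable (Pre_common_digit x y s) := by
  unfold Pre_common_digit; infer_instance

def pvWitness_common_digit : Int × Int × Int := (12, 25, 10)

def Spec_common_digit (x : Int) (y : Int) (s : Int) (out : Bool) : Prop := out = common_digit_alt x y s
instance (x : Int) (y : Int) (s : Int) (out : Bool) : Decidable (Spec_common_digit x y s out) := by unfold Spec_common_digit; infer_instance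

-- ===== CLAIM (what is proved, stated in full; the proofs are below) =====
def Claim_equal_common_digit : Prop := ∀ (x : Int) (y : Int) (s : Int), Dom_common_digit x y s → Pre_common_digit x y s → Spec_common_digit x y s (common_digit x y s)

-- ===== LEMMAS AND PROOFS =====

-- the base-s digit list of n, for 1 < s (proof-only abstraction of both programs' loops)
def dList (n s : Int) : List Int :=
  if h : 0 < n ∧ 1 < s then PySem.Int.mod n s :: dList (PySem.Int.floordiv n s) s else []
termination_by n.toNat
decreasing_by exact pv_floordiv_toNat_lt h.1 h.2

theorem dList_bounds (n s : Int) : ∀ d ∈ dList n s, 0 ≤ d ∧ d < s := by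
  induction n using dList.induct s with
  | case1 n h ih =>
      rw [dList, dif_pos h]
      intro d hd
      rcases List.mem_cons.1 hd with rfl | hd
      · exact ⟨PySem.Int.mod_nonneg n (by omega), PySem.Int.mod_lt n (by omega)⟩
      · exact ih d hd
  | case2 n h =>
      rw [dList, dif_neg h]; intro d hd; simp at hd

theorem altInner_char (y s d : Int) (hs : 1 < s) :
    altInner y s d = (dList y s).any (fun e => e == d) := by
  induction y using altInner.induct s d with
  | case1 y h hhit =>
      rw [altInner, dif_pos h, dList, dif_pos ⟨h.1, hs⟩, List.any_cons]
      simp [hhit]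
  | case2 y h hmiss ih =>
      rw [altInner, dif_pos h, dList, dif_pos ⟨h.1, hs⟩, List.any_cons]
      simp only [Bool.not_eq_true] at hmiss
      simp [hmiss, ih]
  | case3 y h =>
      have : ¬ (0 < y ∧ 1 < s) := fun hc => h ⟨hc.1, Or.inl hc.2⟩
      rw [altInner, dif_neg h, dList, dif_neg this]
      simp

theorem altOuter_char (x y s : Int) (hs : 1 < s) :
    altOuter x y s = (dList x s).any (fun d => altInner y s d) := by
  induction x using altOuter.induct y s with
  | case1 x h hhit =>
      rw [altOuter, dif_pos h, dList, dif_pos ⟨h.1, hs⟩, List.any_cons]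
      simp [hhit]
  | case2 x h hmiss ih =>
      rw [altOuter, dif_pos h, dList, dif_pos ⟨h.1, hs⟩, List.any_cons]
      simp only [Bool.not_eq_true] at hmiss
      simp [hmiss, ih]
  | case3 x h =>
      have : ¬ (0 < x ∧ 1 < s) := fun hc => h ⟨hc.1, Or.inl hc.2⟩
      rw [altOuter, dif_neg h, dList, dif_neg this]
      simp

-- D[j] after "D[n] = True", everything at Python's Int index
theorem pv_getD_setD (xs : List Bool) (n : Nat) (j : Int) (v d : Bool)
    (hn : n < xs.length) (h0 : 0 ≤ j) :
    PySem.List.pyGetD (PySem.List.pySetD xs (n : Int) v) j d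
      = if j = (n : Int) then v else PySem.List.pyGetD xs j d := by
  have hj : j = ((j.toNat : Nat) : Int) := (Int.toNat_of_nonneg h0).symm
  rw [hj, PySem.List.pyGetD_pySetD_natCast xs n j.toNat v d hn]
  by_cases hc : j.toNat = n
  · simp [hc]
  · rw [if_neg hc, if_neg (by exact_mod_cast hc)]

theorem cdLoop1_getD (x s : Int) (D : List Bool) : D.length = s.toNat →
    ∀ (j : Int), 0 ≤ j → j < s →
    PySem.List.pyGetD (cdLoop1 x s D) j false
      = (PySem.List.pyGetD D j false || decide (j ∈ dList x s)) := by
  induction x, D using cdLoop1.induct s with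
  | case1 x D h ih =>
      intro hD j hj hjs
      rw [cdLoop1, dif_pos h, dList, dif_pos h]
      rw [ih (by rw [PySem.List.length_pySetD, hD]) j hj hjs]
      have hm0 : 0 ≤ PySem.Int.mod x s := PySem.Int.mod_nonneg x (by omega)
      have hms : PySem.Int.mod x s < s := PySem.Int.mod_lt x (by omega)
      have hcast : ((PySem.Int.mod x s).toNat : Int) = PySem.Int.mod x s :=
        Int.toNat_of_nonneg hm0
      have hlt : (PySem.Int.mod x s).toNat < D.length := by omega
      rw [← hcast, pv_getD_setD D _ j true false hlt hj, hcast]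
      by_cases hje : j = PySem.Int.mod x s
      · simp [hje]
      · simp [hje, List.mem_cons]
  | case2 x D h =>
      intro _ j _ _
      rw [cdLoop1, dif_neg h, dList, dif_neg h]
      simp

theorem cdLoop2_char (y s : Int) (D : List Bool) :
    cdLoop2 y s D = (dList y s).any (fun d => PySem.List.pyGetD D d false) := by
  induction y using cdLoop2.induct s D with
  | case1 y h hhit =>
      rw [cdLoop2, dif_pos h, dList, dif_pos h, List.any_cons]
      simp [hhit]
  | case2 y h hmiss ih =>
      rw [cdLoop2, dif_pos h, dList, dif_pos h, List.any_cons]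
      simp only [Bool.not_eq_true] at hmiss
      simp [hmiss, ih]
  | case3 y h =>
      rw [cdLoop2, dif_neg h, dList, dif_neg h]
      simp

theorem pv_getD_replicate (k : Nat) (j : Int) (h0 : 0 ≤ j) (h1 : j < (k : Int)) :
    PySem.List.pyGetD (List.replicate k false) j false = false := by
  rw [PySem.List.pyGetD_eq_getElem _ false h0 (by simpa using h1)]
  simp

-- ===== VERDICT (by name: the statement is the Claim_ definition above) =====
theorem common_digit_spec : Claim_equal_common_digit := by
  intro x y s _ hpre
  unfold Spec_common_digit
  unfold Pre_common_digit at hpre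
  by_cases hs : 2 ≤ s
  · have hs1 : 1 < s := by omega
    rw [Bool.eq_iff_iff]
    simp only [common_digit, common_digit_alt]
    rw [cdLoop2_char, altOuter_char x y s hs1]
    constructor
    · intro hA
      rcases List.any_eq_true.1 hA with ⟨d, hd, hget⟩
      obtain ⟨hd0, hds⟩ := dList_bounds y s d hd
      rw [cdLoop1_getD x s _ (by simp) d hd0 hds,
          pv_getD_replicate s.toNat d hd0 (by omega)] at hget
      simp only [Bool.false_or, decide_eq_true_eq] at hget
      refine List.any_eq_true.2 ⟨d, hget, ?_⟩
      rw [altInner_char y s d hs1]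
      exact List.any_eq_true.2 ⟨d, hd, by simp⟩
    · intro hB
      rcases List.any_eq_true.1 hB with ⟨d, hd, hin⟩
      rw [altInner_char y s d hs1] at hin
      rcases List.any_eq_true.1 hin with ⟨e, he, heq⟩
      have heq' : e = d := by simpa using heq
      subst heq'
      refine List.any_eq_true.2 ⟨e, he, ?_⟩
      obtain ⟨he0, hes⟩ := dList_bounds x s e hd
      rw [cdLoop1_getD x s _ (by simp) e he0 hes,
          pv_getD_replicate s.toNat e he0 (by omega)]
      simp [hd]
  · obtain ⟨hx, hy⟩ : x ≤ 0 ∧ y ≤ 0 := by tauto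
    simp only [common_digit, common_digit_alt]
    rw [cdLoop2, dif_neg (by omega), altOuter, dif_neg (by omega)]
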